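-- pv_equiv track=rewrite | github.com/luamz/graphs | Dijkstra.py | generates_cost_matrix
-- ===== SOURCE A (Python) =====
-- def generates_cost_matrix(n, infty):
--     cost = []
--     for i in range(n):
--         line = []
--         for j in range(n):
--             if i == j:
--                 line.append(0)
--             else:
--                 line.append(infty)
--         cost.append(line)
--     return cost
-- ===== SOURCE B (Python) =====
-- def generates_cost_matrix(n, infty):
--     if n <= 0:
--         return []
--     rows = [[0] + [infty] * (n - 1)]
--     for _ in range(n - 1):
--         rows.append([infty] + rows[-1][:-1])
--     return rows
-- ===== Notes on version B (the rewrite author's own statement) =====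
-- stated objective: alternative
-- what changed: Instead of deciding each cell with an i==j branch, B builds only the first row ([0, infty, ..., infty]) explicitly and derives every subsequent row from the previous one by a shift (prepend infty, drop the last element), exploiting that each row of the matrix is a right-shift of the row above.
import Mathlib
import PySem

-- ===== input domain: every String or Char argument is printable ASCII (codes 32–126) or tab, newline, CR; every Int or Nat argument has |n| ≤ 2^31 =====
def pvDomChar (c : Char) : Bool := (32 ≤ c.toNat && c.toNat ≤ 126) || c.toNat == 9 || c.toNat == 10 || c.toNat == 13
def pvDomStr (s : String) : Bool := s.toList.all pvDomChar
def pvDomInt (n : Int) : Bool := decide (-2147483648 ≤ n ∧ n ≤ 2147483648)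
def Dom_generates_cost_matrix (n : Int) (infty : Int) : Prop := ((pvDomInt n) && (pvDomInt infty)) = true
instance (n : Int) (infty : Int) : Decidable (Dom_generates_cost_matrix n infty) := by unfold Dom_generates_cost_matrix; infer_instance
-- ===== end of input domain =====

-- B builds only the first row and derives each subsequent row by shifting the previous one
-- (prepend infty, drop the last element) instead of A's per-cell i==j branch; objective: alternative.

-- ===== PORT A =====
def generates_cost_matrix (n : Int) (infty : Int) : List (List Int) :=
  (PySem.List.pyRange 0 n 1).foldl (fun cost i =>
    cost ++ [(PySem.List.pyRange 0 n 1).foldl (fun line j =>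
      line ++ [if i = j then (0 : Int) else infty]) []]) []

-- ===== PORT B =====
-- '[infty] * (n - 1)' is List.replicate (n-1).toNat infty (Python list repetition; n ≥ 1 here);
-- 'rows[-1]' is pyGet? rows (-1) (rows is always nonempty in the loop, so the [] default is never used);
-- 'rows[-1][:-1]' is PySem.List.slice … none (some (-1)) — exact Python [:-1] semantics.
def generates_cost_matrix_alt (n : Int) (infty : Int) : List (List Int) :=
  if n ≤ 0 then []
  else
    let row0 : List Int := [0] ++ List.replicate (n - 1).toNat infty
    (PySem.List.pyRange 0 (n - 1) 1).foldl (fun rows _ =>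
      rows ++ [[infty] ++ PySem.List.slice ((PySem.List.pyGet? rows (-1)).getD []) none (some (-1))])
      [row0]

-- ===== PRECONDITION & SPEC =====
def Spec_generates_cost_matrix (n : Int) (infty : Int) (out : List (List Int)) : Prop := out = generates_cost_matrix_alt n infty
instance (n : Int) (infty : Int) (out : List (List Int)) : Decidable (Spec_generates_cost_matrix n infty out) := by unfold Spec_generates_cost_matrix; infer_instance

-- ===== CLAIM (what is proved, stated in full; the proofs are below) =====
def Claim_equal_generates_cost_matrix : Prop := ∀ (n : Int) (infty : Int), Dom_generates_cost_matrix n infty → Spec_generates_cost_matrix n infty (generates_cost_matrix n infty)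

-- ===== LEMMAS AND PROOFS =====

-- the canonical row i of the N×N matrix
def pvRow (N i : ℕ) (infty : Int) : List Int := (List.replicate N infty).set i 0

-- append-accumulator fold is init ++ map
theorem pv_foldl_push {α β : Type} (f : α → β) (l : List α) (init : List β) :
    l.foldl (fun acc x => acc ++ [f x]) init = init ++ l.map f := by
  induction l generalizing init with
  | nil => simp
  | cons a t ih => simp [List.foldl, ih]

-- the two row shapes agree
theorem pv_row_eq (N i : ℕ) (infty : Int) :
    (List.range N).map (fun (j : ℕ) => if (i : Int) = (j : Int) then 0 else infty) =
    pvRow N i infty := by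
  apply List.ext_getElem
  · simp [pvRow]
  · intro p hp hq
    simp only [List.length_map, List.length_range] at hp
    simp only [pvRow]
    rw [List.getElem_set]
    simp only [List.getElem_map, List.getElem_range, List.getElem_replicate]
    by_cases h : i = p
    · simp [h]
    · have hne : ¬ ((i : Int) = (p : Int)) := by exact_mod_cast h
      simp [h, hne]

-- closed form for A
theorem pv_A_closed (n : Int) (infty : Int) :
    generates_cost_matrix n infty =
      (List.range n.toNat).map (fun (i : ℕ) => pvRow n.toNat i infty) := by
  unfold generates_cost_matrix
  rw [pv_foldl_push, PySem.List.pyRange_zero, List.map_map]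
  simp only [List.nil_append]
  refine List.map_congr_left ?_
  intro i _
  simp only [Function.comp_apply]
  rw [pv_foldl_push]
  simp only [List.nil_append, List.map_map, Function.comp_def]
  exact pv_row_eq n.toNat i infty

-- shifting row k gives row (k+1)
theorem pv_shift (N k : ℕ) (infty : Int) (h : k + 1 < N) :
    [infty] ++ (pvRow N k infty).dropLast = pvRow N (k + 1) infty := by
  apply List.ext_getElem
  · simp [pvRow]; omega
  · intro p hp hq
    simp only [pvRow, List.cons_append, List.nil_append] at *
    cases p with
    | zero =>
      simp only [List.getElem_cons_zero]
      rw [List.getElem_set]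
      simp
    | succ q =>
      simp only [List.getElem_cons_succ]
      rw [List.getElem_dropLast, List.getElem_set, List.getElem_set]
      simp only [List.getElem_replicate]
      by_cases hk : k = q
      · simp [hk]
      · simp [hk]

-- the loop invariant: after m shift steps the rows are rows 0..m
theorem pv_B_loop (N : ℕ) (infty : Int) (m : ℕ) (hm : m + 1 ≤ N) (l : List Int)
    (hl : l.length = m) :
    l.foldl (fun rows _ =>
      rows ++ [[infty] ++ PySem.List.slice ((PySem.List.pyGet? rows (-1)).getD []) none (some (-1))])
      [pvRow N 0 infty] =
    (List.range (m + 1)).map (fun i => pvRow N i infty) := by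
  induction m generalizing l with
  | zero =>
    have : l = [] := List.eq_nil_of_length_eq_zero hl
    simp [this]
  | succ k ih =>
    rcases List.exists_of_length_succ l hl with ⟨a, t, rfl⟩
    -- peel the LAST iteration off the k+1 steps
    obtain ⟨t', x, hx⟩ : ∃ t' x, a :: t = t' ++ [x] := by
      rcases List.eq_nil_or_concat (a :: t) with h | ⟨t', x, h⟩
      · simp at h
      · exact ⟨t', x, by simpa [List.concat_eq_append] using h⟩
    rw [hx, List.foldl_append]
    have ht' : t'.length = k := by
      have h1 := congrArg List.length hx
      have h2 := hl
      simp at h1 h2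
      omega
    rw [ih (by omega) t' ht']
    simp only [List.foldl_cons, List.foldl_nil]
    have hlast : PySem.List.pyGet? ((List.range (k + 1)).map (fun i => pvRow N i infty)) (-1)
        = some (pvRow N k infty) := by
      rw [PySem.List.pyGet?_neg_one]
      rw [List.getLast?_eq_getElem?]
      simp
    rw [hlast]
    simp only [Option.getD_some, PySem.List.slice_to_neg_one]
    rw [pv_shift N k infty (by omega)]
    simp [List.range_succ]

-- closed form for B
theorem pv_B_closed (n : Int) (infty : Int) :
    generates_cost_matrix_alt n infty =
      (List.range n.toNat).map (fun (i : ℕ) => pvRow n.toNat i infty) := by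
  unfold generates_cost_matrix_alt
  by_cases hn : n ≤ 0
  · have : n.toNat = 0 := by omega
    simp [hn, this]
  · simp only [hn, if_false]
    have h1 : (1 : Int) ≤ n := by omega
    have hrow0 : [0] ++ List.replicate (n - 1).toNat infty = pvRow n.toNat 0 infty := by
      have hsucc : n.toNat = (n - 1).toNat + 1 := by omega
      simp only [pvRow]
      rw [hsucc, List.replicate_succ]
      simp
    rw [hrow0]
    have hlen : (PySem.List.pyRange 0 (n - 1) 1).length = (n - 1).toNat := by
      rw [PySem.List.pyRange_zero]; simp
    rw [pv_B_loop n.toNat infty (n - 1).toNat (by omega) _ hlen]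
    have : (n - 1).toNat + 1 = n.toNat := by omega
    rw [this]

-- ===== VERDICT (by name: the statement is the Claim_ definition above) =====
theorem generates_cost_matrix_spec : Claim_equal_generates_cost_matrix := by
  intro n infty _
  unfold Spec_generates_cost_matrix
  rw [pv_A_closed, pv_B_closed]
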